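-- pv_equiv track=rewrite | github.com/mickevics-n/rule_based_NER_cargo_descriptions | scripts.py | count_words_until_match_left
-- ===== SOURCE A (Python) =====
-- def count_words_until_match_left(pakaging, full_weight, input_text):
--     """
--     Counts words in between pakaging and full_weight in input_text.
--
--     Args:
--         pakaging (str): a string containing packaging info.
--         full_weight (str) a string containing weight + unit info.
--         input_text (str) a string containing a description of cargo, including details about weight and packaging.
--
--     Returns:
--         int: count
--     """
--     start_index = input_text.find(full_weight)
--     substring_before_weight = input_text[:start_index]
--     reversed_substring = substring_before_weight[::-1]
--     words = reversed_substring.split()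
--     count = 0
--     reversed_case = pakaging[::-1]
--     for word in words:
--         if reversed_case in word:
--             break
--         count += 1
--
--     return count
-- ===== SOURCE B (Python) =====
-- def count_words_until_match_left(pakaging, full_weight, input_text):
--     """Forward scan: index of last word containing pakaging, then a closed-form count."""
--     start_index = input_text.find(full_weight)
--     substring_before_weight = input_text[:start_index]
--     words = substring_before_weight.split()
--     last_index = -1
--     for i, word in enumerate(words):
--         if pakaging in word:
--             last_index = i
--     return len(words) - 1 - last_index
-- ===== Notes on version B (the rewrite author's own statement) =====
-- stated objective: simpler
-- what changed: B drops both string reversals: it splits the forward substring once and does a single forward enumerate pass recording the index of the last word containing pakaging, returning len(words)-1-last_index, instead of A's reverse-the-string, split, and scan-with-break accumulator loop.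
import Mathlib
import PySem

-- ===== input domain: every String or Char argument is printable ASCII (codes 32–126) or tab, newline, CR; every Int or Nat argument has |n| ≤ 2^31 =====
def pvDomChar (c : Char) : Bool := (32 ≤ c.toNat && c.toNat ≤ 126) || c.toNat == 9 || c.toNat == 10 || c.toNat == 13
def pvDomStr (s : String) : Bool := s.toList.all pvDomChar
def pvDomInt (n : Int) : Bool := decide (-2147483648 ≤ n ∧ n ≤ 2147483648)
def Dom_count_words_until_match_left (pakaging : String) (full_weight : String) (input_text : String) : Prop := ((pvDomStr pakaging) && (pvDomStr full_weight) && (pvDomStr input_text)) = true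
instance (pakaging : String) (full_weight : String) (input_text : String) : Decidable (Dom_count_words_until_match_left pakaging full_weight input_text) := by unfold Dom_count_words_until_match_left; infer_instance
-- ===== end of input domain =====

-- B replaces A's double string reversal + reverse scan with break by one forward split and a
-- forward enumerate pass recording the last matching index, returning a closed-form count (simpler).

-- ===== PORT A =====
-- the 'for word in words: if reversed_case in word: break; count += 1' loop of A
def cwA_loop (reversed_case : List Char) : List (List Char) → Int
  | [] => 0
  | word :: rest =>
    if PySem.Chars.isIn reversed_case word then 0 else cwA_loop reversed_case rest + 1

def count_words_until_match_left (pakaging : String) (full_weight : String) (input_text : String) : Int :=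
  let start_index := PySem.Str.find input_text full_weight
  let substring_before_weight := PySem.List.slice input_text.toList none (some start_index)
  let reversed_substring := (PySem.List.slice? substring_before_weight none none (-1)).getD []
  let words := PySem.Chars.split₀ reversed_substring
  let reversed_case := (PySem.List.slice? pakaging.toList none none (-1)).getD []
  cwA_loop reversed_case words

-- ===== PORT B =====
-- the 'for i, word in enumerate(words): if pakaging in word: last_index = i' loop of B
def cwB_last (pakaging : List Char) (words : List (List Char)) : Int :=
  (PySem.List.enumerate words 0).foldl
    (fun acc iw => if PySem.Chars.isIn pakaging iw.2 then iw.1 else acc) (-1)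

def count_words_until_match_left_alt (pakaging : String) (full_weight : String) (input_text : String) : Int :=
  let start_index := PySem.Str.find input_text full_weight
  let substring_before_weight := PySem.List.slice input_text.toList none (some start_index)
  let words := PySem.Chars.split₀ substring_before_weight
  (words.length : Int) - 1 - cwB_last pakaging.toList words

-- ===== PRECONDITION & SPEC =====
def Spec_count_words_until_match_left (pakaging : String) (full_weight : String) (input_text : String) (out : Int) : Prop := out = count_words_until_match_left_alt pakaging full_weight input_text
instance (pakaging : String) (full_weight : String) (input_text : String) (out : Int) : Decidable (Spec_count_words_until_match_left pakaging full_weight input_text out) := by unfold Spec_count_words_until_match_left; infer_instance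

-- ===== CLAIM (what is proved, stated in full; the proofs are below) =====
def Claim_equal_count_words_until_match_left : Prop := ∀ (pakaging : String) (full_weight : String) (input_text : String), Dom_count_words_until_match_left pakaging full_weight input_text → Spec_count_words_until_match_left pakaging full_weight input_text (count_words_until_match_left pakaging full_weight input_text)

-- ===== LEMMAS AND PROOFS =====

-- structural reformulation of Python's str.split() with no separator: skip leading whitespace,
-- then the maximal non-space run is one word
def wordsF : List Char → List (List Char)
  | [] => []
  | c :: rest =>
    if PySem.Chars.isspace c then wordsF rest
    else (c :: rest.takeWhile (fun d => !PySem.Chars.isspace d)) ::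
      wordsF (rest.dropWhile (fun d => !PySem.Chars.isspace d))
  termination_by s => s.length
  decreasing_by
    all_goals
      have := List.length_dropWhile_le (fun d => !PySem.Chars.isspace d) rest
      simp
      try omega

-- split₀.go's accumulator invariant, stated through glueW
def glueW (pre : List Char) (s : List Char) : List (List Char) :=
  if pre = [] then wordsF s
  else (pre ++ s.takeWhile (fun d => !PySem.Chars.isspace d)) ::
    wordsF (s.dropWhile (fun d => !PySem.Chars.isspace d))

theorem go_eq_glueW (s cur : List Char) (acc : List (List Char)) :
    PySem.Chars.split₀.go s cur acc = acc.reverse ++ glueW cur.reverse s := by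
  induction s generalizing cur acc with
  | nil =>
    by_cases h : cur = []
    · simp [PySem.Chars.split₀.go, glueW, h, wordsF]
    · simp [PySem.Chars.split₀.go, glueW, h, wordsF, List.isEmpty_iff]
  | cons c rest ih =>
    by_cases hs : PySem.Chars.isspace c
    · by_cases h : cur = []
      · rw [PySem.Chars.split₀.go.eq_def]
        simp only [hs, if_true, h, List.isEmpty_nil, if_true]
        rw [ih]
        simp [glueW, wordsF, hs]
      · rw [PySem.Chars.split₀.go.eq_def]
        simp only [hs, if_true, List.isEmpty_iff, h, if_false]
        rw [ih]
        simp only [List.reverse_cons, List.reverse_nil, List.append_assoc]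
        congr 1
        simp [glueW, wordsF, hs, h]
    · rw [PySem.Chars.split₀.go.eq_def]
      simp only [hs, Bool.false_eq_true, if_false]
      rw [ih]
      congr 1
      simp only [glueW, List.reverse_cons]
      have hne : cur.reverse ++ [c] ≠ [] := by simp
      simp only [hne, if_false]
      by_cases h : cur = []
      · subst h
        simp [wordsF, hs]
      · have : cur.reverse ≠ [] := by simpa using h
        simp [this, hs]

theorem split₀_eq_wordsF (s : List Char) : PySem.Chars.split₀ s = wordsF s := by
  have := go_eq_glueW s [] []
  simpa [PySem.Chars.split₀, glueW] using this

theorem head_dropWhile_cons {α : Type} (p : α → Bool) (l : List α) (d : α) (dtl : List α)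
    (h : l.dropWhile p = d :: dtl) : p d = false := by
  have h1 := List.head_dropWhile_not p (l := l) (by simp [h])
  simpa [h] using h1

theorem wordsF_all (w : List Char) (hne : w ≠ [])
    (h : ∀ d ∈ w, PySem.Chars.isspace d = false) : wordsF w = [w] := by
  cases w with
  | nil => exact absurd rfl hne
  | cons c rest =>
    have hc : PySem.Chars.isspace c = false := h c (List.mem_cons_self ..)
    have hall : ∀ d ∈ rest, (fun d => !PySem.Chars.isspace d) d = true := by
      intro d hd; simp [h d (List.mem_cons_of_mem _ hd)]
    rw [wordsF]
    simp [hc, List.takeWhile_eq_self_iff.mpr hall, List.dropWhile_eq_nil_iff.mpr hall, wordsF]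

-- appending a trailing whitespace char does not change the words
theorem wordsF_append_space (c : Char) (hc : PySem.Chars.isspace c = true) :
    ∀ (n : Nat) (ys : List Char), ys.length ≤ n → wordsF (ys ++ [c]) = wordsF ys := by
  intro n
  induction n with
  | zero =>
    intro ys hy
    have : ys = [] := List.eq_nil_of_length_eq_zero (Nat.le_zero.mp hy)
    subst this
    simp [wordsF, hc]
  | succ n ih =>
    intro ys hy
    cases ys with
    | nil => simp [wordsF, hc]
    | cons a t =>
      by_cases ha : PySem.Chars.isspace a
      · rw [List.cons_append, wordsF, if_pos ha, wordsF, if_pos ha]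
        exact ih t (by simpa using Nat.lt_succ_iff.mp (by simpa using hy))
      · rw [List.cons_append, wordsF, if_neg ha, wordsF, if_neg ha]
        by_cases hall : ∀ x ∈ t, (fun d => !PySem.Chars.isspace d) x = true
        · have htw : t.takeWhile (fun d => !PySem.Chars.isspace d) = t :=
            List.takeWhile_eq_self_iff.mpr hall
          have hdw : t.dropWhile (fun d => !PySem.Chars.isspace d) = [] :=
            List.dropWhile_eq_nil_iff.mpr hall
          rw [List.takeWhile_append, List.dropWhile_append]
          simp [htw, hdw, wordsF, hc]
        · have htw : (t.takeWhile (fun d => !PySem.Chars.isspace d)).length ≠ t.length := by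
            intro hlen
            exact hall (List.takeWhile_eq_self_iff.mp
              ((List.takeWhile_sublist _).eq_of_length hlen))
          have hdw : t.dropWhile (fun d => !PySem.Chars.isspace d) ≠ [] := by
            intro hnil; exact hall (List.dropWhile_eq_nil_iff.mp hnil)
          rw [List.takeWhile_append, List.dropWhile_append]
          simp only [htw, if_false, List.isEmpty_iff, hdw]
          have hlen : (t.dropWhile (fun d => !PySem.Chars.isspace d)).length ≤ n := by
            have h1 := List.length_dropWhile_le (fun d => !PySem.Chars.isspace d) t
            have h2 : t.length ≤ n := by simpa using Nat.lt_succ_iff.mp (by simpa using hy)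
            omega
          rw [ih _ hlen]

-- appending a non-space word after text that ends in whitespace appends exactly one word
theorem wordsF_append_word :
    ∀ (n : Nat) (u w : List Char), u.length ≤ n → u ≠ [] →
      (∀ x, u.getLast? = some x → PySem.Chars.isspace x = true) → w ≠ [] →
      (∀ d ∈ w, PySem.Chars.isspace d = false) →
      wordsF (u ++ w) = wordsF u ++ [w] := by
  intro n
  induction n with
  | zero =>
    intro u w hu hne _ _ _
    exact absurd (List.eq_nil_of_length_eq_zero (Nat.le_zero.mp hu)) hne
  | succ n ih =>
    intro u w hu hne hlast hwne hwall
    cases u with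
    | nil => exact absurd rfl hne
    | cons a t =>
      cases t with
      | nil =>
        have ha : PySem.Chars.isspace a = true := hlast a (by simp)
        simp only [List.nil_append, List.cons_append]
        rw [wordsF, if_pos ha, wordsF, if_pos ha]
        simp [wordsF_all w hwne hwall, wordsF]
      | cons b t' =>
        have hlast' : ∀ x, (b :: t').getLast? = some x → PySem.Chars.isspace x = true := by
          intro x hx
          exact hlast x (by rw [List.getLast?_cons_cons]; exact hx)
        have htlen : (b :: t').length ≤ n := by simpa using Nat.lt_succ_iff.mp (by simpa using hu)
        by_cases ha : PySem.Chars.isspace a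
        · rw [List.cons_append, wordsF, if_pos ha, wordsF, if_pos ha]
          exact ih (b :: t') w htlen (by simp) hlast' hwne hwall
        · rw [List.cons_append, wordsF, if_neg ha, wordsF, if_neg ha]
          -- the last element of b :: t' is a space, so it is not all non-space
          obtain ⟨sp, hsp⟩ : ∃ sp, (b :: t').getLast? = some sp := by
            cases h : (b :: t').getLast? with
            | none => simp at h
            | some x => exact ⟨x, rfl⟩
          have hspmem : sp ∈ b :: t' := List.mem_of_getLast? hsp
          have hspspace := hlast' sp hsp
          have hnotall : ¬ ∀ x ∈ b :: t', (fun d => !PySem.Chars.isspace d) x = true := by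
            intro hall
            have := hall sp hspmem
            simp [hspspace] at this
          have htw : ((b :: t').takeWhile (fun d => !PySem.Chars.isspace d)).length ≠ (b :: t').length := by
            intro hlen
            exact hnotall (List.takeWhile_eq_self_iff.mp
              ((List.takeWhile_sublist _).eq_of_length hlen))
          have hdw : (b :: t').dropWhile (fun d => !PySem.Chars.isspace d) ≠ [] := by
            intro hnil; exact hnotall (List.dropWhile_eq_nil_iff.mp hnil)
          rw [List.takeWhile_append, List.dropWhile_append]
          simp only [htw, if_false, List.isEmpty_iff, hdw]
          have hdlen : ((b :: t').dropWhile (fun d => !PySem.Chars.isspace d)).length ≤ n := by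
            have h1 := List.length_dropWhile_le (fun d => !PySem.Chars.isspace d) (b :: t')
            omega
          have hdlast : ∀ x, ((b :: t').dropWhile (fun d => !PySem.Chars.isspace d)).getLast? = some x →
              PySem.Chars.isspace x = true := by
            intro x hx
            obtain ⟨v, hv⟩ := List.dropWhile_suffix (l := b :: t') (fun d => !PySem.Chars.isspace d)
            apply hlast'
            rw [← hv, List.getLast?_append]
            rw [hx]
            rfl
          rw [ih _ w hdlen hdw hdlast hwne hwall]
          simp

-- words of the reversed string are the reversed words in reverse order
theorem wordsF_reverse_aux :
    ∀ (n : Nat) (s : List Char), s.length ≤ n →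
      wordsF s.reverse = ((wordsF s).map List.reverse).reverse := by
  intro n
  induction n with
  | zero =>
    intro s hs
    have : s = [] := List.eq_nil_of_length_eq_zero (Nat.le_zero.mp hs)
    subst this
    simp [wordsF]
  | succ n ih =>
    intro s hs
    cases s with
    | nil => simp [wordsF]
    | cons c t =>
      have htlen : t.length ≤ n := by simpa using Nat.lt_succ_iff.mp (by simpa using hs)
      by_cases hc : PySem.Chars.isspace c
      · rw [List.reverse_cons, wordsF_append_space c hc n t.reverse (by simpa using htlen),
          ih t htlen, wordsF, if_pos hc]
      · set p : Char → Bool := fun d => !PySem.Chars.isspace d with hp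
        set tw := t.takeWhile p with htwdef
        set dw := t.dropWhile p with hdwdef
        have hsplit : t = tw ++ dw := (List.takeWhile_append_dropWhile).symm
        have hwne : tw.reverse ++ [c] ≠ [] := by simp
        have hwall : ∀ d ∈ tw.reverse ++ [c], PySem.Chars.isspace d = false := by
          intro d hd
          rcases List.mem_append.mp hd with h | h
          · have := List.mem_takeWhile_imp (List.mem_reverse.mp h)
            simpa [hp] using this
          · simp at h
            subst h
            simpa using hc
        have hrev : (c :: t).reverse = dw.reverse ++ (tw.reverse ++ [c]) := by
          rw [List.reverse_cons]
          conv_lhs => rw [hsplit]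
          simp
        have hRHS : wordsF (c :: t) = (c :: tw) :: wordsF dw := by
          rw [wordsF, if_neg hc]
        rw [hrev, hRHS]
        by_cases hdwnil : dw = []
        · rw [hdwnil]
          simp only [List.reverse_nil, List.nil_append]
          rw [wordsF_all _ hwne hwall]
          simp [wordsF, List.reverse_cons]
        · have hdlen : dw.length ≤ n := by
            have := List.length_dropWhile_le p t
            rw [← hdwdef] at this
            omega
          have hdlast : ∀ x, dw.reverse.getLast? = some x → PySem.Chars.isspace x = true := by
            intro x hx
            rw [List.getLast?_reverse] at hx
            cases hd : dw with
            | nil => simp [hd] at hx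
            | cons d dtl =>
              rw [hd] at hx
              simp at hx
              subst hx
              have hdc : t.dropWhile p = d :: dtl := by rw [← hdwdef]; exact hd
              have := head_dropWhile_cons p t d dtl hdc
              simpa [hp] using this
          rw [wordsF_append_word n dw.reverse (tw.reverse ++ [c]) (by simpa using hdlen)
            (by simpa using hdwnil) hdlast hwne hwall]
          rw [ih dw hdlen]
          simp [List.reverse_cons]

theorem wordsF_reverse (s : List Char) :
    wordsF s.reverse = ((wordsF s).map List.reverse).reverse :=
  wordsF_reverse_aux s.length s (le_refl _)

theorem isIn_reverse (pl w : List Char) :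
    PySem.Chars.isIn pl.reverse w.reverse = PySem.Chars.isIn pl w := by
  cases h : PySem.Chars.isIn pl w
  · rw [PySem.Chars.isIn_eq_false_iff] at h
    rw [PySem.Chars.isIn_eq_false_iff]
    simpa [List.reverse_infix] using h
  · rw [PySem.Chars.isIn_iff_infix] at h ⊢
    simpa [List.reverse_infix] using h

theorem cwB_last_append (pl : List Char) (ys : List (List Char)) (w : List Char) :
    cwB_last pl (ys ++ [w]) =
      if PySem.Chars.isIn pl w then (ys.length : Int) else cwB_last pl ys := by
  unfold cwB_last
  rw [PySem.List.enumerate_append, List.foldl_append]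
  simp

-- A's reverse scan with break equals B's closed form from the last matching index
theorem cwA_loop_eq (pl : List Char) (ws : List (List Char)) :
    cwA_loop pl.reverse ((ws.map List.reverse).reverse) =
      (ws.length : Int) - 1 - cwB_last pl ws := by
  induction ws using List.reverseRecOn with
  | nil => simp [cwA_loop, cwB_last]
  | append_singleton ys w ih =>
    rw [cwB_last_append]
    simp only [List.map_append, List.reverse_append, List.map_cons, List.map_nil,
      List.reverse_cons, List.reverse_nil, List.nil_append, List.singleton_append,
      List.length_append, List.length_cons, List.length_nil]
    rw [cwA_loop, isIn_reverse]
    by_cases h : PySem.Chars.isIn pl w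
    · simp [h]
    · simp only [h, Bool.false_eq_true, if_false, ih]
      push_cast
      ring

-- ===== VERDICT (by name: the statement is the Claim_ definition above) =====
theorem count_words_until_match_left_spec : Claim_equal_count_words_until_match_left := by
  intro pakaging full_weight input_text _
  unfold Spec_count_words_until_match_left count_words_until_match_left count_words_until_match_left_alt
  simp only [PySem.List.slice?_none_none_neg_one, Option.getD_some, split₀_eq_wordsF,
    wordsF_reverse]
  exact cwA_loop_eq _ _
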